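-- pv_equiv track=rewrite | github.com/bioCKO/Bioinf_utils | b2G/aggregate_go_terms_for_eurots.py | ortho_clust_to_dict
-- ===== SOURCE A (Python) =====
-- def rename(gene):
--     if 'TF' in gene:
--         no = 5-len(gene[3:])
--         gene = 'TFLA_' + no*'0' + gene[3:] + '0'
--     elif 'Pf' in gene:
--         no = 5-len(gene[3:])
--         gene = 'PFUN_' + no*'0' + gene[3:] + '0'
--     elif "ANID" in gene:
--         gene = gene[:10]
--     elif "Pc_gi_" in gene:
--         gene = gene[16:]
--     return gene
--
-- def ortho_clust_to_dict(inf,genlst):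
--     clust = {}
--     for line in inf:
--         col = line.strip('\n').split(' ')
--         good = ["ANID","Pma","CIM","Tst","Tfl",'Pfu',"Hca","Pbr","Pch","Afu","Nfi","Acl","Ate","Afl","Aor","Ani"]
--         asper = ["ANID","Afu","Nfi","Acl","Ate","Afl","Aor","Ani"]
--         genes = [rename(x[x.find("|")+1:]) for x in col[1:] if x[:x.find("|")] in good]
--         clust[col[0][:-1]] = genes
--         aspgenes = [rename(x[x.find("|")+1:]) for x in col[1:] if x[:x.find("|")] in asper]
--         genlst += aspgenes
--     return clust,genlst
-- ===== SOURCE B (Python) =====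
-- # staged pipeline: classify each token once via a prefix->is_aspergillus table,
-- # parse all lines into (key, genes, asp) triples, then build the dict and extend genlst once
-- CAT = {"ANID": True, "Pma": False, "CIM": False, "Tst": False, "Tfl": False,
--        "Pfu": False, "Hca": False, "Pbr": False, "Pch": False, "Afu": True,
--        "Nfi": True, "Acl": True, "Ate": True, "Afl": True, "Aor": True, "Ani": True}
--
-- def _rename(g):
--     if 'TF' in g:
--         return 'TFLA_' + g[3:].rjust(5, '0') + '0'
--     if 'Pf' in g:
--         return 'PFUN_' + g[3:].rjust(5, '0') + '0'
--     if 'ANID' in g: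
--         return g[:10]
--     if 'Pc_gi_' in g:
--         return g[16:]
--     return g
--
-- def _parse(line):
--     toks = line.strip('\n').split(' ')
--     cuts = [(x[:x.find('|')], x[x.find('|') + 1:]) for x in toks[1:]]
--     hits = [(CAT[p], _rename(r)) for p, r in cuts if p in CAT]
--     return (toks[0][:-1],
--             [g for _, g in hits],
--             [g for asp, g in hits if asp])
--
-- def ortho_clust_to_dict(inf, genlst):
--     parsed = [_parse(line) for line in inf]
--     clust = {k: gs for k, gs, _ in parsed}
--     genlst += [g for _, _, asp in parsed for g in asp]
--     return clust, genlst
-- ===== Notes on version B (the rewrite author's own statement) =====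
-- stated objective: alternative
-- what changed: B replaces A's two per-line filter-comprehensions over lists good/asper (which re-find '|', re-slice and re-run rename for the asper subset) by a staged pipeline: one prefix->is_aspergillus classification table so each token is cut, looked up and renamed exactly once, all lines parsed into (key, genes, asp) triples first, then the dict is built once by comprehension and genlst extended once; rename pads with str.rjust instead of manual '0'-multiplication.
import Mathlib
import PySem

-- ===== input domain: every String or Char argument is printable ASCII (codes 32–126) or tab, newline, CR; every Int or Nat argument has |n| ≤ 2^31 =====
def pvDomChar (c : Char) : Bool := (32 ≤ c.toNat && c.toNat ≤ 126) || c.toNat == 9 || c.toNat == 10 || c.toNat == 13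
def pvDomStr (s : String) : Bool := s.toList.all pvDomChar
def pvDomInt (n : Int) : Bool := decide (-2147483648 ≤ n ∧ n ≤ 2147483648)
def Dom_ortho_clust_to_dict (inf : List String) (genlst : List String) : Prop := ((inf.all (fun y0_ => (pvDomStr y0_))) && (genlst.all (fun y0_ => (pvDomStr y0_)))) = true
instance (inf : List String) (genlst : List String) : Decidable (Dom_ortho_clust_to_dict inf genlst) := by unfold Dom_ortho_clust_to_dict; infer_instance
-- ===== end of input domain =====

-- B restages A as a pipeline: a prefix -> is-aspergillus table classifies each token once
-- (instead of A's two filter-comprehensions over the lists good/asper), all lines are parsed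
-- into (key, genes, asp) triples first, then the dict is built once and genlst extended once.
-- A mutates genlst in place (genlst += …); the equivalence proved is about the RETURN value.

-- ===== PORT A =====
def renameA (gene : String) : String :=
  if PySem.Str.isIn "TF" gene then
    let t := PySem.List.slice gene.toList (some 3) none
    String.ofList ("TFLA_".toList ++ PySem.List.pyRepeat "0".toList (5 - (t.length : Int)) ++ t ++ "0".toList)
  else if PySem.Str.isIn "Pf" gene then
    let t := PySem.List.slice gene.toList (some 3) none
    String.ofList ("PFUN_".toList ++ PySem.List.pyRepeat "0".toList (5 - (t.length : Int)) ++ t ++ "0".toList)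
  else if PySem.Str.isIn "ANID" gene then
    PySem.Str.slice gene none (some 10)
  else if PySem.Str.isIn "Pc_gi_" gene then
    PySem.Str.slice gene (some 16) none
  else gene

def goodA : List String := ["ANID","Pma","CIM","Tst","Tfl","Pfu","Hca","Pbr","Pch","Afu","Nfi","Acl","Ate","Afl","Aor","Ani"]
def asperA : List String := ["ANID","Afu","Nfi","Acl","Ate","Afl","Aor","Ani"]

def ortho_clust_to_dict (inf : List String) (genlst : List String) : (List (String × List String)) × List String :=
  let res := inf.foldl (fun (st : PySem.Dict String (List String) × List String) line =>
    -- col = line.strip('\n').split(' ')  (sep " " ≠ "", so split? is always some)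
    let col := (PySem.Str.split? (PySem.Str.stripChars line "\n") " ").getD []
    let genes := ((PySem.List.slice col (some 1) none).filter
        (fun x => goodA.contains (PySem.Str.slice x none (some (PySem.Str.find x "|"))))).map
        (fun x => renameA (PySem.Str.slice x (some (PySem.Str.find x "|" + 1)) none))
    -- col[0]: split(' ') always returns at least one piece, so headD never uses its default
    let clust := st.1.insert (PySem.Str.slice (col.headD "") none (some (-1))) genes
    let aspgenes := ((PySem.List.slice col (some 1) none).filter
        (fun x => asperA.contains (PySem.Str.slice x none (some (PySem.Str.find x "|"))))).map
        (fun x => renameA (PySem.Str.slice x (some (PySem.Str.find x "|" + 1)) none))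
    (clust, st.2 ++ aspgenes)) (PySem.Dict.empty, genlst)
  (res.1.items, res.2)

-- ===== PORT B =====
-- CAT = {prefix: is_aspergillus}
def catB : PySem.Dict String Bool := PySem.Dict.ofList
  [("ANID", true), ("Pma", false), ("CIM", false), ("Tst", false), ("Tfl", false),
   ("Pfu", false), ("Hca", false), ("Pbr", false), ("Pch", false), ("Afu", true),
   ("Nfi", true), ("Acl", true), ("Ate", true), ("Afl", true), ("Aor", true), ("Ani", true)]

-- s.rjust(w, '0'): exact hand port for a single-char fill (PySem has no rjust)
def rjust0 (cs : List Char) (w : Nat) : List Char := List.replicate (w - cs.length) '0' ++ cs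

def renameB (g : String) : String :=
  if PySem.Str.isIn "TF" g then
    String.ofList ("TFLA_".toList ++ rjust0 (PySem.List.slice g.toList (some 3) none) 5 ++ "0".toList)
  else if PySem.Str.isIn "Pf" g then
    String.ofList ("PFUN_".toList ++ rjust0 (PySem.List.slice g.toList (some 3) none) 5 ++ "0".toList)
  else if PySem.Str.isIn "ANID" g then PySem.Str.slice g none (some 10)
  else if PySem.Str.isIn "Pc_gi_" g then PySem.Str.slice g (some 16) none
  else g

-- _parse(line): tokenize, cut each token at '|', classify via the table, split the hits
def parseB (line : String) : String × List String × List String :=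
  let toks := (PySem.Str.split? (PySem.Str.stripChars line "\n") " ").getD []
  let cuts := (PySem.List.slice toks (some 1) none).map (fun x =>
      (PySem.Str.slice x none (some (PySem.Str.find x "|")),
       PySem.Str.slice x (some (PySem.Str.find x "|" + 1)) none))
  -- CAT[p] is guarded by 'if p in CAT', so the total getD is exact here
  let hits := (cuts.filter (fun pr => catB.contains pr.1)).map
      (fun pr => (catB.getD pr.1 false, renameB pr.2))
  (PySem.Str.slice (toks.headD "") none (some (-1)),
   hits.map (·.2), (hits.filter (·.1)).map (·.2))

def ortho_clust_to_dict_alt (inf : List String) (genlst : List String) : (List (String × List String)) × List String :=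
  let parsed := inf.map parseB
  let clust := parsed.foldl (fun (d : PySem.Dict String (List String)) t => d.insert t.1 t.2.1) PySem.Dict.empty
  (clust.items, genlst ++ parsed.flatMap (fun t => t.2.2))

-- ===== PRECONDITION & SPEC =====
def Spec_ortho_clust_to_dict (inf : List String) (genlst : List String) (out : (List (String × List String)) × List String) : Prop := out = ortho_clust_to_dict_alt inf genlst
instance (inf : List String) (genlst : List String) (out : (List (String × List String)) × List String) : Decidable (Spec_ortho_clust_to_dict inf genlst out) := by unfold Spec_ortho_clust_to_dict; infer_instance

-- ===== CLAIM (what is proved, stated in full; the proofs are below) =====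
def Claim_equal_ortho_clust_to_dict : Prop := ∀ (inf : List String) (genlst : List String), Dom_ortho_clust_to_dict inf genlst → Spec_ortho_clust_to_dict inf genlst (ortho_clust_to_dict inf genlst)

-- ===== LEMMAS AND PROOFS =====

set_option maxRecDepth 4096 in
theorem rename_eq (g : String) : renameB g = renameA g := by
  simp only [renameA, renameB, rjust0]
  have h : ∀ cs : List Char,
      List.replicate (5 - cs.length) '0' = PySem.List.pyRepeat "0".toList (5 - (cs.length : Int)) := by
    intro cs
    rw [show ("0".toList : List Char) = ['0'] from rfl, PySem.List.pyRepeat_singleton]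
    congr 1
    omega
  split_ifs <;> first | (rw [h]; simp only [List.append_assoc]) | rfl

theorem catB_mk : catB = PySem.Dict.mk
    [("ANID", true), ("Pma", false), ("CIM", false), ("Tst", false), ("Tfl", false),
     ("Pfu", false), ("Hca", false), ("Pbr", false), ("Pch", false), ("Afu", true),
     ("Nfi", true), ("Acl", true), ("Ate", true), ("Afl", true), ("Aor", true), ("Ani", true)] := by
  decide

theorem cat_contains (p : String) : catB.contains p = goodA.contains p := by
  rw [catB_mk]
  simp [goodA]
  simp [Bool.beq_comm]
  tauto

theorem cat_getD (p : String) (h : goodA.contains p = true) :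
    catB.getD p false = asperA.contains p := by
  rw [catB_mk]
  simp only [goodA, List.contains_eq_mem, List.mem_cons, List.not_mem_nil, or_false,
    decide_eq_true_eq] at h
  rcases h with h|h|h|h|h|h|h|h|h|h|h|h|h|h|h|h <;> subst h <;> decide

theorem asper_sub_good (p : String) (h : asperA.contains p = true) : goodA.contains p = true := by
  simp only [asperA, goodA, List.contains_eq_mem, List.mem_cons, List.not_mem_nil, or_false,
    decide_eq_true_eq] at h ⊢
  tauto

-- B's cut/classify/split-the-hits pipeline over one token list equals A's two filter/maps
theorem stage_eq {α β γ δ : Type} (toks : List α) (cut : α → β × γ)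
    (cond : β → Bool) (aspf : β → Bool) (ren : γ → δ)
    (pG pA : α → Bool) (f : α → δ)
    (h1 : ∀ x, cond (cut x).1 = pG x)
    (h2 : ∀ x, pG x = true → aspf (cut x).1 = pA x)
    (h3 : ∀ x, pA x = true → pG x = true)
    (h4 : ∀ x, ren (cut x).2 = f x) :
    (((toks.map cut).filter (fun pr => cond pr.1)).map (fun pr => (aspf pr.1, ren pr.2))).map (·.2)
        = (toks.filter pG).map f
    ∧ ((((toks.map cut).filter (fun pr => cond pr.1)).map
          (fun pr => (aspf pr.1, ren pr.2))).filter (·.1)).map (·.2)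
        = (toks.filter pA).map f := by
  induction toks with
  | nil => simp
  | cons x rest ih =>
    by_cases hg : pG x = true
    · by_cases ha : pA x = true
      · simp [h1, h2 x hg, h4, hg, ha, ih.1, ih.2]
      · simp [h1, h2 x hg, h4, hg, ha, ih.1, ih.2]
    · have ha : pA x ≠ true := fun hh => hg (h3 x hh)
      simp [h1, hg, ha, ih.1, ih.2]

-- per line: B's parse triple carries A's key, genes and aspgenes
set_option maxHeartbeats 1000000 in
theorem parse_line (line : String) :
    parseB line =
      (let col := (PySem.Str.split? (PySem.Str.stripChars line "\n") " ").getD []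
       (PySem.Str.slice (col.headD "") none (some (-1)),
        ((PySem.List.slice col (some 1) none).filter
          (fun x => goodA.contains (PySem.Str.slice x none (some (PySem.Str.find x "|"))))).map
          (fun x => renameA (PySem.Str.slice x (some (PySem.Str.find x "|" + 1)) none)),
        ((PySem.List.slice col (some 1) none).filter
          (fun x => asperA.contains (PySem.Str.slice x none (some (PySem.Str.find x "|"))))).map
          (fun x => renameA (PySem.Str.slice x (some (PySem.Str.find x "|" + 1)) none)))) := by
  have h := stage_eq
    (PySem.List.slice ((PySem.Str.split? (PySem.Str.stripChars line "\n") " ").getD []) (some 1) none)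
    (fun x => (PySem.Str.slice x none (some (PySem.Str.find x "|")),
               PySem.Str.slice x (some (PySem.Str.find x "|" + 1)) none))
    (fun p => catB.contains p) (fun p => catB.getD p false) renameB
    (fun x => goodA.contains (PySem.Str.slice x none (some (PySem.Str.find x "|"))))
    (fun x => asperA.contains (PySem.Str.slice x none (some (PySem.Str.find x "|"))))
    (fun x => renameA (PySem.Str.slice x (some (PySem.Str.find x "|" + 1)) none))
    (fun x => cat_contains _)
    (fun x hg => cat_getD _ hg)
    (fun x ha => asper_sub_good _ ha)
    (fun x => rename_eq _)
  simp only [parseB]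
  rw [Prod.mk.injEq, Prod.mk.injEq]
  exact ⟨rfl, h.1, h.2⟩

-- the staged pipeline (parse every line, then fold the dict, then one big append)
-- equals A's single fold carrying (dict, genlst)
theorem fold_stage (inf : List String) (d : PySem.Dict String (List String)) (gl : List String) :
    inf.foldl (fun (st : PySem.Dict String (List String) × List String) line =>
      let col := (PySem.Str.split? (PySem.Str.stripChars line "\n") " ").getD []
      let genes := ((PySem.List.slice col (some 1) none).filter
          (fun x => goodA.contains (PySem.Str.slice x none (some (PySem.Str.find x "|"))))).map
          (fun x => renameA (PySem.Str.slice x (some (PySem.Str.find x "|" + 1)) none))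
      let clust := st.1.insert (PySem.Str.slice (col.headD "") none (some (-1))) genes
      let aspgenes := ((PySem.List.slice col (some 1) none).filter
          (fun x => asperA.contains (PySem.Str.slice x none (some (PySem.Str.find x "|"))))).map
          (fun x => renameA (PySem.Str.slice x (some (PySem.Str.find x "|" + 1)) none))
      (clust, st.2 ++ aspgenes)) (d, gl)
    = ((inf.map parseB).foldl (fun (d : PySem.Dict String (List String)) t => d.insert t.1 t.2.1) d,
       gl ++ (inf.map parseB).flatMap (fun t => t.2.2)) := by
  induction inf generalizing d gl with
  | nil => simp
  | cons line rest ih =>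
    simp only [List.foldl_cons, List.map_cons, List.flatMap_cons, ih, parse_line line]
    simp

-- ===== VERDICT (by name: the statement is the Claim_ definition above) =====
theorem ortho_clust_to_dict_spec : Claim_equal_ortho_clust_to_dict := by
  intro inf genlst _
  unfold Spec_ortho_clust_to_dict ortho_clust_to_dict ortho_clust_to_dict_alt
  rw [fold_stage]
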